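-- pv_equiv track=rewrite | github.com/OumaCavin/jac-interactive-learning-platform | backend/apps/agents/evaluator.py | _generate_competency_recommendations
-- ===== SOURCE A (Python) =====
-- from typing import Dict, Any, List, Optional
--
-- def _generate_competency_recommendations(results: Dict) -> List[str]:
--     """Generate personalized competency development recommendations"""
--     recommendations = []
--
--     # Analyze assessment results
--     emerging_competencies = []
--     developing_competencies = []
--     proficient_competencies = []
--     advanced_competencies = []
--
--     for competency, assessment in results.items():
--         level = assessment.get("level", "emerging")
--         if level == "emerging":
--             emerging_competencies.append(competency)
--         elif level == "developing":
--             developing_competencies.append(competency)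
--         elif level == "proficient":
--             proficient_competencies.append(competency)
--         elif level == "advanced":
--             advanced_competencies.append(competency)
--
--     # Generate recommendations based on patterns
--     if emerging_competencies:
--         recommendations.append(f"Focus on foundational skills in: {', '.join(emerging_competencies[:3])}")
--         recommendations.append("Consider additional practice exercises for emerging competencies")
--
--     if developing_competencies:
--         recommendations.append("Build on developing competencies through guided projects")
--         recommendations.append("Seek feedback on work in developing areas")
--
--     if len(proficient_competencies) >= 3:
--         recommendations.append("Leverage strong competencies to mentor others")
--         recommendations.append("Take on leadership roles in projects requiring these skills")
--
--     if advanced_competencies: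
--         recommendations.append("Pursue advanced challenges and complex projects")
--         recommendations.append("Consider contributing to knowledge sharing or teaching")
--
--     # General recommendations
--     recommendations.extend([
--         "Continue regular practice across all competency areas",
--         "Seek diverse learning opportunities to strengthen weaker areas",
--         "Document learning journey and progress for future reference"
--     ])
--
--     return recommendations
-- ===== SOURCE B (Python) =====
-- def _first_at_level(results, level, k):
--     """First at most k competencies whose level is `level`, stopping early."""
--     found = []
--     for competency, assessment in results.items():
--         if assessment.get("level", "emerging") == level:
--             found.append(competency)
--             if len(found) == k:
--                 break
--     return found
--
--
-- def _generate_competency_recommendations(results):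
--     """Generate personalized competency development recommendations"""
--     # No grouping pass at all: each recommendation section queries only the few
--     # facts it needs via short, early-stopping scans (at most 3 emerging names,
--     # one developing witness, 3 proficient witnesses, one advanced witness).
--     recommendations = []
--
--     top_emerging = _first_at_level(results, "emerging", 3)
--     if top_emerging:
--         recommendations.append("Focus on foundational skills in: " + ", ".join(top_emerging))
--         recommendations.append("Consider additional practice exercises for emerging competencies")
--
--     if _first_at_level(results, "developing", 1):
--         recommendations.append("Build on developing competencies through guided projects")
--         recommendations.append("Seek feedback on work in developing areas")
--
--     if len(_first_at_level(results, "proficient", 3)) == 3: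
--         recommendations.append("Leverage strong competencies to mentor others")
--         recommendations.append("Take on leadership roles in projects requiring these skills")
--
--     if _first_at_level(results, "advanced", 1):
--         recommendations.append("Pursue advanced challenges and complex projects")
--         recommendations.append("Consider contributing to knowledge sharing or teaching")
--
--     recommendations.extend([
--         "Continue regular practice across all competency areas",
--         "Seek diverse learning opportunities to strengthen weaker areas",
--         "Document learning journey and progress for future reference",
--     ])
--     return recommendations
-- ===== Notes on version B (the rewrite author's own statement) =====
-- stated objective: alternative
-- what changed: B never materialises the four per-level groups: instead of A's single bucketing pass into four accumulator lists, each recommendation section asks an early-stopping scan for exactly the facts it needs (the first 3 emerging names, one developing witness, whether 3 proficient exist, one advanced witness), so no full level-grouped lists are ever built.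
import Mathlib
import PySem

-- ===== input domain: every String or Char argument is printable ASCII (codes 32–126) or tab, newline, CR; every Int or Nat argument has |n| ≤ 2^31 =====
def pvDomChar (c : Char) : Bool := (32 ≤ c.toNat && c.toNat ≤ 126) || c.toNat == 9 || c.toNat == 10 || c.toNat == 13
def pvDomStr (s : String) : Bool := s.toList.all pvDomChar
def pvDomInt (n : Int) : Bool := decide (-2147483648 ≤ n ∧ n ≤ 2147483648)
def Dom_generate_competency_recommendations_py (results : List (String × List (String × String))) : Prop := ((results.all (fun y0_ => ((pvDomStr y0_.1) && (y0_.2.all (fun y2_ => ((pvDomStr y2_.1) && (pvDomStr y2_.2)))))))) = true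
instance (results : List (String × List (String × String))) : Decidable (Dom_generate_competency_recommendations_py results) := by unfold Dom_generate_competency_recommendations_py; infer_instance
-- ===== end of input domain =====

-- B builds no per-level groups at all: each section asks an early-stopping scan for just
-- the facts it needs (first 3 emerging names, one developing witness, 3 proficient
-- witnesses, one advanced witness) instead of A's bucketing pass into four lists
-- (objective: alternative).

-- level = assessment.get("level", "emerging")  (shared helper; dict lookup with default)
def pvLevel (a : List (String × String)) : String :=
  PySem.Dict.getD (PySem.Dict.mk a) "level" "emerging"

-- ===== PORT A =====
def generate_competency_recommendations_py (results : List (String × List (String × String))) : List String :=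
  let s := results.foldl
    (fun (st : List String × List String × List String × List String) p =>
      let level := pvLevel p.2
      if level == "emerging" then (st.1 ++ [p.1], st.2.1, st.2.2.1, st.2.2.2)
      else if level == "developing" then (st.1, st.2.1 ++ [p.1], st.2.2.1, st.2.2.2)
      else if level == "proficient" then (st.1, st.2.1, st.2.2.1 ++ [p.1], st.2.2.2)
      else if level == "advanced" then (st.1, st.2.1, st.2.2.1, st.2.2.2 ++ [p.1])
      else st)
    ([], [], [], [])
  let emerging := s.1
  let developing := s.2.1
  let proficient := s.2.2.1
  let advanced := s.2.2.2
  let recs : List String := []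
  let recs := if !emerging.isEmpty then
      recs ++ ["Focus on foundational skills in: " ++ PySem.Str.join ", " (PySem.List.slice emerging none (some 3)),
               "Consider additional practice exercises for emerging competencies"]
    else recs
  let recs := if !developing.isEmpty then
      recs ++ ["Build on developing competencies through guided projects",
               "Seek feedback on work in developing areas"]
    else recs
  let recs := if 3 ≤ proficient.length then
      recs ++ ["Leverage strong competencies to mentor others",
               "Take on leadership roles in projects requiring these skills"]
    else recs
  let recs := if !advanced.isEmpty then
      recs ++ ["Pursue advanced challenges and complex projects",
               "Consider contributing to knowledge sharing or teaching"]
    else recs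
  recs ++ ["Continue regular practice across all competency areas",
           "Seek diverse learning opportunities to strengthen weaker areas",
           "Document learning journey and progress for future reference"]

-- ===== PORT B =====
-- _first_at_level's loop: append a matching competency, break as soon as k are found
def pvFirstAtGo (lv : String) (k : Nat) :
    List (String × List (String × String)) → List String → List String
  | [], found => found
  | p :: rest, found =>
    if pvLevel p.2 == lv then
      let found := found ++ [p.1]
      if found.length == k then found else pvFirstAtGo lv k rest found
    else pvFirstAtGo lv k rest found

def pvFirstAt (results : List (String × List (String × String))) (lv : String) (k : Nat) :
    List String :=
  pvFirstAtGo lv k results []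

def generate_competency_recommendations_py_alt (results : List (String × List (String × String))) : List String :=
  let recs : List String := []
  let topEmerging := pvFirstAt results "emerging" 3
  let recs := if !topEmerging.isEmpty then
      recs ++ ["Focus on foundational skills in: " ++ PySem.Str.join ", " topEmerging,
               "Consider additional practice exercises for emerging competencies"]
    else recs
  let recs := if !(pvFirstAt results "developing" 1).isEmpty then
      recs ++ ["Build on developing competencies through guided projects",
               "Seek feedback on work in developing areas"]
    else recs
  let recs := if (pvFirstAt results "proficient" 3).length == 3 then
      recs ++ ["Leverage strong competencies to mentor others",
               "Take on leadership roles in projects requiring these skills"]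
    else recs
  let recs := if !(pvFirstAt results "advanced" 1).isEmpty then
      recs ++ ["Pursue advanced challenges and complex projects",
               "Consider contributing to knowledge sharing or teaching"]
    else recs
  recs ++ ["Continue regular practice across all competency areas",
           "Seek diverse learning opportunities to strengthen weaker areas",
           "Document learning journey and progress for future reference"]

-- ===== PRECONDITION & SPEC =====
def Spec_generate_competency_recommendations_py (results : List (String × List (String × String))) (out : List String) : Prop := out = generate_competency_recommendations_py_alt results
instance (results : List (String × List (String × String))) (out : List String) : Decidable (Spec_generate_competency_recommendations_py results out) := by unfold Spec_generate_competency_recommendations_py; infer_instance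

-- ===== CLAIM =====
def Claim_equal_generate_competency_recommendations_py : Prop := ∀ (results : List (String × List (String × String))), Dom_generate_competency_recommendations_py results → Spec_generate_competency_recommendations_py results (generate_competency_recommendations_py results)

-- ===== LEMMAS AND PROOFS =====

-- the competencies whose level is c, in input order
def pvGrp (results : List (String × List (String × String))) (c : String) : List String :=
  (results.filter (fun p => pvLevel p.2 == c)).map (·.1)

lemma pvLoopA (l : List (String × List (String × String)))
    (e d p a : List String) :
    l.foldl (fun (st : List String × List String × List String × List String) q =>
      let level := pvLevel q.2
      if level == "emerging" then (st.1 ++ [q.1], st.2.1, st.2.2.1, st.2.2.2)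
      else if level == "developing" then (st.1, st.2.1 ++ [q.1], st.2.2.1, st.2.2.2)
      else if level == "proficient" then (st.1, st.2.1, st.2.2.1 ++ [q.1], st.2.2.2)
      else if level == "advanced" then (st.1, st.2.1, st.2.2.1, st.2.2.2 ++ [q.1])
      else st) (e, d, p, a)
    = (e ++ pvGrp l "emerging", d ++ pvGrp l "developing",
       p ++ pvGrp l "proficient", a ++ pvGrp l "advanced") := by
  induction l generalizing e d p a with
  | nil => simp [pvGrp]
  | cons q l ih =>
    simp only [List.foldl_cons]
    split_ifs with h1 h2 h3 h4 <;>
      simp_all [pvGrp]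

-- the early-stopping scan returns the first k of the group
lemma pvFirstAtGo_eq (lv : String) (k : Nat)
    (l : List (String × List (String × String))) :
    ∀ found : List String, found.length < k →
      pvFirstAtGo lv k l found = (found ++ pvGrp l lv).take k := by
  induction l with
  | nil =>
    intro found h
    simp [pvFirstAtGo, pvGrp, List.take_of_length_le (le_of_lt h)]
  | cons q l ih =>
    intro found h
    simp only [pvFirstAtGo]
    by_cases hq : pvLevel q.2 == lv
    · have hgrp : pvGrp (q :: l) lv = q.1 :: pvGrp l lv := by simp [pvGrp, hq]
      rw [if_pos hq]
      by_cases hk : ((found ++ [q.1]).length == k) = true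
      · have hk' : (found ++ [q.1]).length = k := by simpa using hk
        rw [if_pos hk, hgrp,
            show found ++ q.1 :: pvGrp l lv = (found ++ [q.1]) ++ pvGrp l lv by simp,
            ← hk', List.take_left]
      · have hk' : (found ++ [q.1]).length < k := by
          simp only [List.length_append, List.length_cons, List.length_nil] at *
          simp at hk
          omega
        rw [if_neg hk, ih _ hk', hgrp]
        simp
    · rw [if_neg hq, ih _ h]
      have hgrp : pvGrp (q :: l) lv = pvGrp l lv := by simp [pvGrp, hq]
      rw [hgrp]

lemma pvFirstAt_eq (results : List (String × List (String × String))) (lv : String)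
    (k : Nat) (hk : 0 < k) :
    pvFirstAt results lv k = (pvGrp results lv).take k := by
  simpa using pvFirstAtGo_eq lv k results [] (by simpa using hk)

-- ===== VERDICT =====
theorem generate_competency_recommendations_py_spec : Claim_equal_generate_competency_recommendations_py := by
  intro results _
  unfold Spec_generate_competency_recommendations_py
  unfold generate_competency_recommendations_py generate_competency_recommendations_py_alt
  simp only [pvLoopA, List.nil_append]
  rw [pvFirstAt_eq results "emerging" 3 (by omega),
      pvFirstAt_eq results "developing" 1 (by omega),
      pvFirstAt_eq results "proficient" 3 (by omega),
      pvFirstAt_eq results "advanced" 1 (by omega)]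
  have hsl : PySem.List.slice (pvGrp results "emerging") none (some 3)
      = (pvGrp results "emerging").take 3 := by
    simpa using PySem.List.slice_to_natCast (pvGrp results "emerging") 3
  rw [hsl]
  have hE : ((pvGrp results "emerging").take 3).isEmpty = (pvGrp results "emerging").isEmpty := by
    cases pvGrp results "emerging" <;> simp
  have hD : ((pvGrp results "developing").take 1).isEmpty = (pvGrp results "developing").isEmpty := by
    cases pvGrp results "developing" <;> simp
  have hA : ((pvGrp results "advanced").take 1).isEmpty = (pvGrp results "advanced").isEmpty := by
    cases pvGrp results "advanced" <;> simp
  have hP : (((pvGrp results "proficient").take 3).length == 3)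
      = decide (3 ≤ (pvGrp results "proficient").length) := by
    by_cases h : 3 ≤ (pvGrp results "proficient").length <;>
      simp [List.length_take, h]
  rw [hE, hD, hA, hP]
  by_cases h1 : (pvGrp results "emerging").isEmpty <;>
  by_cases h2 : (pvGrp results "developing").isEmpty <;>
  by_cases h3 : 3 ≤ (pvGrp results "proficient").length <;>
  by_cases h4 : (pvGrp results "advanced").isEmpty <;>
    simp [h1, h2, h3, h4]
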